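-- pv_equiv track=rewrite | github.com/satvikt/ds_python | data_structures/array_manipulation/max_diff_largest_appears_after_smallest_2.py | maxDiff2
-- ===== SOURCE A (Python) =====
-- def maxDiff2(arr, size):
--     # diff_arr = [0]*size
--     diff = arr[1] - arr[0]
--     max_diff = diff
--     # for i in range(2, size):
--     #     diff_arr[i-1] = arr[i] - arr[i-1]
--
--     for i in range(2, size):
--         curr = arr[i] - arr[i-1]
--         if curr > 0:
--             diff += curr
--
--         if max_diff < diff:
--             max_diff = diff
--
--     return max_diff
-- ===== SOURCE B (Python) =====
-- def maxDiff2(arr, size):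
--     # Valley-peak sweep: instead of clamping every consecutive difference,
--     # walk down to each local valley, climb to the next local peak, and add
--     # peak - valley once per rising run.
--     total = arr[1] - arr[0]
--     i = 1
--     while i < size - 1:
--         while i < size - 1 and arr[i + 1] <= arr[i]:
--             i += 1
--         valley = arr[i]
--         while i < size - 1 and arr[i + 1] >= arr[i]:
--             i += 1
--         total += arr[i] - valley
--     return total
-- ===== Notes on version B (the rewrite author's own statement) =====
-- stated objective: alternative
-- what changed: Replaces A's per-gap clamped accumulation with a maintained running maximum by a valley-peak sweep: nested while loops walk down to each local minimum, climb to the following local maximum, and add peak minus valley once per rising run.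
import Mathlib
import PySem

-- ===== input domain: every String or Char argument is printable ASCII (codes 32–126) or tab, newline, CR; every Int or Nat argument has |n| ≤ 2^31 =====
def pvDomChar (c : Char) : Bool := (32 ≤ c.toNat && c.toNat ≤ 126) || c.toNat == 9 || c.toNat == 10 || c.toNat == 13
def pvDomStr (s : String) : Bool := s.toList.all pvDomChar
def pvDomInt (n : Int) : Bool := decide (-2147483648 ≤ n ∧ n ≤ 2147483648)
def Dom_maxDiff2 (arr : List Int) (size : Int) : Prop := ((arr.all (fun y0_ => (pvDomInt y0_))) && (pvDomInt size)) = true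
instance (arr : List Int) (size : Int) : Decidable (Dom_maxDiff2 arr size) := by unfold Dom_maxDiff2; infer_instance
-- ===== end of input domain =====

-- B replaces A's clamped-gap accumulation with running maximum by a valley-peak sweep:
-- walk down to each local valley, climb to the next local peak, add peak - valley.

-- ===== PORT A =====
-- faithful step-by-step port of A: running diff and running max_diff over range(2, size)
def maxDiff2 (arr : List Int) (size : Int) : Int :=
  let diff := PySem.List.pyGetD arr 1 0 - PySem.List.pyGetD arr 0 0
  let st := (PySem.List.pyRange 2 size 1).foldl
    (fun (st : Int × Int) i =>
      let curr := PySem.List.pyGetD arr i 0 - PySem.List.pyGetD arr (i - 1) 0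
      let diff' := if curr > 0 then st.1 + curr else st.1
      let max' := if st.2 < diff' then diff' else st.2
      (diff', max'))
    (diff, diff)
  st.2

-- ===== PORT B =====
-- The while loops are ported as structural recursion on a fuel that counts the remaining
-- loop-bound distance (size - 1 - i); each loop advances i by at least 1 per iteration,
-- so the fuel never runs out before the loop guard turns false (proved in the lemmas).

-- inner loop 1 of Source B: while i < size - 1 and arr[i+1] <= arr[i]: i += 1
def mdSkip (arr : List Int) (size : Int) : Nat → Int → Int
  | 0, i => i
  | fuel + 1, i =>
    if i < size - 1 ∧ PySem.List.pyGetD arr (i + 1) 0 ≤ PySem.List.pyGetD arr i 0 then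
      mdSkip arr size fuel (i + 1)
    else i

-- inner loop 2 of Source B: while i < size - 1 and arr[i+1] >= arr[i]: i += 1
def mdClimb (arr : List Int) (size : Int) : Nat → Int → Int
  | 0, i => i
  | fuel + 1, i =>
    if i < size - 1 ∧ PySem.List.pyGetD arr i 0 ≤ PySem.List.pyGetD arr (i + 1) 0 then
      mdClimb arr size fuel (i + 1)
    else i

-- outer loop of Source B: while i < size - 1: skip down to valley; climb to peak; add peak - valley
def mdSweep (arr : List Int) (size : Int) : Nat → Int → Int → Int
  | 0, _, total => total
  | fuel + 1, i, total =>
    if i < size - 1 then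
      let v := mdSkip arr size (size - 1 - i).toNat i
      let p := mdClimb arr size (size - 1 - v).toNat v
      mdSweep arr size fuel p (total + (PySem.List.pyGetD arr p 0 - PySem.List.pyGetD arr v 0))
    else total

-- port of Source B: total = arr[1] - arr[0]; i = 1; valley-peak sweep
def maxDiff2_alt (arr : List Int) (size : Int) : Int :=
  mdSweep arr size (size - 2).toNat 1
    (PySem.List.pyGetD arr 1 0 - PySem.List.pyGetD arr 0 0)

-- ===== PRECONDITION & SPEC =====
-- Pre_ excludes exactly the inputs where Python A raises IndexError: arr must have at
-- least two elements (arr[0], arr[1]) and the loop indices up to size-1 must be in range.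
def Pre_maxDiff2 (arr : List Int) (size : Int) : Prop :=
  2 ≤ arr.length ∧ size ≤ (arr.length : Int)
instance (arr : List Int) (size : Int) : Decidable (Pre_maxDiff2 arr size) := by
  unfold Pre_maxDiff2; infer_instance

def pvWitness_maxDiff2 : List Int × Int := ([3, 1, 4, 1, 5], 5)

def Spec_maxDiff2 (arr : List Int) (size : Int) (out : Int) : Prop := out = maxDiff2_alt arr size
instance (arr : List Int) (size : Int) (out : Int) : Decidable (Spec_maxDiff2 arr size out) := by
  unfold Spec_maxDiff2; infer_instance

-- ===== CLAIM (what is proved, stated in full; the proofs are below) =====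
def Claim_equal_maxDiff2 : Prop := ∀ (arr : List Int) (size : Int), Dom_maxDiff2 arr size → Pre_maxDiff2 arr size → Spec_maxDiff2 arr size (maxDiff2 arr size)

-- ===== LEMMAS AND PROOFS =====

-- remaining clamped-gap sum from position i: sum of max(0, arr[j]-arr[j-1]) for j in i+1..size-1
def mdRest (arr : List Int) (size i : Int) : Int :=
  ((PySem.List.pyRange (i + 1) size 1).map
    (fun j => max 0 (PySem.List.pyGetD arr j 0 - PySem.List.pyGetD arr (j - 1) 0))).sum

theorem mdRest_cons (arr : List Int) (size i : Int) (h : i < size - 1) :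
    mdRest arr size i =
      max 0 (PySem.List.pyGetD arr (i + 1) 0 - PySem.List.pyGetD arr i 0) +
        mdRest arr size (i + 1) := by
  unfold mdRest
  rw [PySem.List.pyRange_one_cons (by omega : i + 1 < size)]
  simp [add_sub_cancel_right]

theorem mdRest_nil (arr : List Int) (size i : Int) (h : size - 1 ≤ i) :
    mdRest arr size i = 0 := by
  unfold mdRest
  rw [PySem.List.pyRange_one_eq_nil (by omega : size ≤ i + 1)]
  simp

theorem mdSkip_ge (arr : List Int) (size : Int) (fuel : Nat) (i : Int) :
    i ≤ mdSkip arr size fuel i := by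
  induction fuel generalizing i with
  | zero => simp [mdSkip]
  | succ fuel ih =>
    rw [mdSkip]
    split
    · have := ih (i + 1); omega
    · omega

theorem mdClimb_ge (arr : List Int) (size : Int) (fuel : Nat) (i : Int) :
    i ≤ mdClimb arr size fuel i := by
  induction fuel generalizing i with
  | zero => simp [mdClimb]
  | succ fuel ih =>
    rw [mdClimb]
    split
    · have := ih (i + 1); omega
    · omega

-- with enough fuel, the skip loop stops only when the guard is false
theorem mdSkip_stop (arr : List Int) (size : Int) (fuel : Nat) (i : Int)
    (hf : size - 1 - i ≤ (fuel : Int)) :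
    mdSkip arr size fuel i < size - 1 →
      PySem.List.pyGetD arr (mdSkip arr size fuel i) 0 <
        PySem.List.pyGetD arr (mdSkip arr size fuel i + 1) 0 := by
  induction fuel generalizing i with
  | zero => simp only [mdSkip]; omega
  | succ fuel ih =>
    rw [mdSkip]
    split
    · rename_i hg
      exact ih (i + 1) (by push_cast at hf ⊢; omega)
    · rename_i hg
      intro h
      omega

-- when the guard holds, the climb loop advances at least one step
theorem mdClimb_step (arr : List Int) (size : Int) (fuel : Nat) (i : Int)
    (hf : 1 ≤ fuel)
    (h1 : i < size - 1)
    (h2 : PySem.List.pyGetD arr i 0 ≤ PySem.List.pyGetD arr (i + 1) 0) :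
    i + 1 ≤ mdClimb arr size fuel i := by
  obtain ⟨fuel', rfl⟩ : ∃ k, fuel = k + 1 := ⟨fuel - 1, by omega⟩
  rw [mdClimb, if_pos ⟨h1, h2⟩]
  exact mdClimb_ge arr size fuel' (i + 1)

-- skipping a descending run does not change the remaining clamped-gap sum
theorem mdSkip_rest (arr : List Int) (size : Int) (fuel : Nat) (i : Int) :
    mdRest arr size i = mdRest arr size (mdSkip arr size fuel i) := by
  induction fuel generalizing i with
  | zero => simp [mdSkip]
  | succ fuel ih =>
    rw [mdSkip]
    split
    · rename_i hg
      rw [mdRest_cons arr size i hg.1, ← ih (i + 1)]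
      have : max 0 (PySem.List.pyGetD arr (i + 1) 0 - PySem.List.pyGetD arr i 0) = 0 := by
        omega
      omega
    · rfl

-- climbing a rising run telescopes: the clamped gaps sum to peak - valley
theorem mdClimb_rest (arr : List Int) (size : Int) (fuel : Nat) (i : Int) :
    mdRest arr size i =
      (PySem.List.pyGetD arr (mdClimb arr size fuel i) 0 - PySem.List.pyGetD arr i 0) +
        mdRest arr size (mdClimb arr size fuel i) := by
  induction fuel generalizing i with
  | zero => simp [mdClimb]
  | succ fuel ih =>
    rw [mdClimb]
    split
    · rename_i hg
      rw [mdRest_cons arr size i hg.1, ih (i + 1)]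
      have : max 0 (PySem.List.pyGetD arr (i + 1) 0 - PySem.List.pyGetD arr i 0) =
          PySem.List.pyGetD arr (i + 1) 0 - PySem.List.pyGetD arr i 0 := by omega
      omega
    · omega

-- outer-loop invariant: with enough fuel the sweep returns total plus the remaining sum
theorem mdSweep_eq (arr : List Int) (size : Int) (fuel : Nat) (i total : Int)
    (hf : size - 1 - i ≤ (fuel : Int)) :
    mdSweep arr size fuel i total = total + mdRest arr size i := by
  induction fuel generalizing i total with
  | zero =>
    rw [mdSweep, mdRest_nil arr size i (by push_cast at hf; omega)]
    omega
  | succ fuel ih =>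
    rw [mdSweep]
    split
    · rename_i hg
      have hv := mdSkip_ge arr size (size - 1 - i).toNat i
      set v := mdSkip arr size (size - 1 - i).toNat i with hvdef
      have hp := mdClimb_ge arr size (size - 1 - v).toNat v
      set p := mdClimb arr size (size - 1 - v).toNat v with hpdef
      have hfuel : size - 1 - p ≤ (fuel : Int) := by
        by_cases hlt : v < size - 1
        · have hstop := mdSkip_stop arr size (size - 1 - i).toNat i (by omega)
          rw [← hvdef] at hstop
          have := mdClimb_step arr size (size - 1 - v).toNat v (by omega) hlt
            (le_of_lt (hstop hlt))
          push_cast at hf ⊢; omega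
        · push_cast at hf ⊢; omega
      rw [ih p _ hfuel, mdSkip_rest arr size (size - 1 - i).toNat i, ← hvdef,
        mdClimb_rest arr size (size - 1 - v).toNat v, ← hpdef]
      ring
    · rename_i hg
      rw [mdRest_nil arr size i (by omega)]
      omega

-- A's fold keeps diff = max_diff (only non-negative increments are added), and the final
-- diff is the start value plus the sum of the clamped increments.
theorem maxDiff2_fold_key (f : Int → Int) (l : List Int) (d : Int) :
    l.foldl
      (fun (st : Int × Int) i =>
        let curr := f i
        let diff' := if curr > 0 then st.1 + curr else st.1
        let max' := if st.2 < diff' then diff' else st.2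
        (diff', max'))
      (d, d)
    = (d + (l.map (fun i => max 0 (f i))).sum, d + (l.map (fun i => max 0 (f i))).sum) := by
  induction l generalizing d with
  | nil => simp
  | cons a t ih =>
    simp only [List.foldl_cons, List.map_cons, List.sum_cons]
    have hstep : (if f a > 0 then d + f a else d) = d + max 0 (f a) := by
      split_ifs with h <;> omega
    have hmax : (if d < (if f a > 0 then d + f a else d) then (if f a > 0 then d + f a else d) else d)
        = d + max 0 (f a) := by
      split_ifs with h1 h2 h3 <;> omega
    rw [hmax, hstep, ih (d + max 0 (f a))]
    simp [add_assoc]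

-- ===== VERDICT (by name: the statement is the Claim_ definition above) =====
theorem maxDiff2_spec : Claim_equal_maxDiff2 := by
  intro arr size _ _
  show maxDiff2 arr size = maxDiff2_alt arr size
  rw [maxDiff2_alt, mdSweep_eq arr size (size - 2).toNat 1 _ (by omega)]
  simp only [maxDiff2, maxDiff2_fold_key]
  unfold mdRest
  norm_num
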